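-- pv_equiv track=rewrite | github.com/Shreyas200188/polymath_test | src/retriever.py | retrieve_products
-- ===== SOURCE A (Python) =====
-- def keyword_match_score(query, text):
--     query_words = query.lower().split()
--     text = text.lower()
--
--     score = 0
--     for word in query_words:
--         if word in text:
--             score += 1
--     return score
--
-- def retrieve_products(query, products):
--     scored = []
--
--     for product in products:
--         text = product["title"] + " " + product["description"]
--         score = keyword_match_score(query, text)
--         scored.append((score, product))
--
--     # sort by score descending
--     scored.sort(key=lambda x: x[0], reverse=True)
--
--     return [p for score, p in scored if score > 0]
-- ===== SOURCE B (Python) =====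
-- def retrieve_products(query, products):
--     words = query.lower().split()
--     n = len(words)
--     # counting-sort buckets: bucket s holds products with score s, in input order
--     buckets = [[] for _ in range(n + 1)]
--     for product in products:
--         text = (product["title"] + " " + product["description"]).lower()
--         score = len([w for w in words if w in text])
--         buckets[score].append(product)
--     result = []
--     for s in range(n, 0, -1):
--         result.extend(buckets[s])
--     return result
-- ===== Notes on version B (the rewrite author's own statement) =====
-- stated objective: alternative
-- what changed: Replaces the build-pairs-then-stable-sort-then-filter pipeline with a counting sort: products are appended to score-indexed buckets in input order and the buckets are concatenated from the highest score down to 1 (bucket 0 dropped), avoiding any comparison sort.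
import Mathlib
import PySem

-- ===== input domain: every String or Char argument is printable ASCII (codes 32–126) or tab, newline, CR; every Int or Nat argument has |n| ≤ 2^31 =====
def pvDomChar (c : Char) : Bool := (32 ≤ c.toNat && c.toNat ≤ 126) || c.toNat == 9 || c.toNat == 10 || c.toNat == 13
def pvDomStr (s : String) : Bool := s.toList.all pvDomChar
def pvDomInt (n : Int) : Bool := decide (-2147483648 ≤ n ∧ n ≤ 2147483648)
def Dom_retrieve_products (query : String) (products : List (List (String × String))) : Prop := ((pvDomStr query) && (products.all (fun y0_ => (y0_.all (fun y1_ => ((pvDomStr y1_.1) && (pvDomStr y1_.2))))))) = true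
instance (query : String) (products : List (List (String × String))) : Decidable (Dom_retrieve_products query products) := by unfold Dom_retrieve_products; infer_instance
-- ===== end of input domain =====

-- B replaces A's build-pairs / stable-sort / filter pipeline by a counting sort over score-indexed
-- buckets emitted from the highest score down to 1 (same return value; A=B proved on Pre_).


-- ===== PORT A =====
-- product["key"] on the List (String × String) model of a dict: first match (KeyError = no match,
-- excluded by Pre_; the default is never reached inside Pre_)
def pvLookup (product : List (String × String)) (k : String) : String :=
  ((product.find? (fun kv => kv.1 == k)).map Prod.snd).getD ""

def keyword_match_score (query : String) (text : String) : Int :=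
  let query_words := PySem.Str.split₀ (PySem.Str.lower query)
  let text := PySem.Str.lower text
  query_words.foldl (fun score word => if PySem.Str.isIn word text then score + 1 else score) 0

def retrieve_products (query : String) (products : List (List (String × String))) : List (List (String × String)) :=
  let scored := products.foldl (fun scored product =>
    let text := pvLookup product "title" ++ " " ++ pvLookup product "description"
    let score := keyword_match_score query text
    scored ++ [(score, product)]) []
  let scored := PySem.List.sorted scored (fun x => x.1) true
  scored.filterMap (fun x => if 0 < x.1 then some x.2 else none)

-- ===== PORT B =====
def retrieve_products_alt (query : String) (products : List (List (String × String))) : List (List (String × String)) :=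
  let words := PySem.Str.split₀ (PySem.Str.lower query)
  let n := words.length
  let buckets := products.foldl (fun bks product =>
    let text := PySem.Str.lower (pvLookup product "title" ++ " " ++ pvLookup product "description")
    let score := (words.filter (fun w => PySem.Str.isIn w text)).length
    PySem.List.pySetD bks (score : Int) (PySem.List.pyGetD bks (score : Int) [] ++ [product]))
    (List.replicate (n + 1) [])
  (PySem.List.pyRange (n : Int) 0 (-1)).foldl (fun res s => res ++ PySem.List.pyGetD buckets s []) []

-- ===== PRECONDITION & SPEC =====
-- Pre_ excludes products missing a "title" or "description" key, on which A raises KeyError.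
def Pre_retrieve_products (query : String) (products : List (List (String × String))) : Prop :=
  ∀ p ∈ products, (p.find? (fun kv => kv.1 == "title")).isSome ∧ (p.find? (fun kv => kv.1 == "description")).isSome
instance (query : String) (products : List (List (String × String))) : Decidable (Pre_retrieve_products query products) := by unfold Pre_retrieve_products; infer_instance
def pvWitness_retrieve_products : String × (List (List (String × String))) :=
  ("red shoe", [[("title", "Red Shoe"), ("description", "a nice shoe")], [("title", "hat"), ("description", "plain")]])

def Spec_retrieve_products (query : String) (products : List (List (String × String))) (out : List (List (String × String))) : Prop := out = retrieve_products_alt query products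
instance (query : String) (products : List (List (String × String))) (out : List (List (String × String))) : Decidable (Spec_retrieve_products query products out) := by unfold Spec_retrieve_products; infer_instance

-- ===== CLAIM (what is proved, stated in full; the proofs are below) =====
def Claim_equal_retrieve_products : Prop := ∀ (query : String) (products : List (List (String × String))), Dom_retrieve_products query products → Pre_retrieve_products query products → Spec_retrieve_products query products (retrieve_products query products)

-- ===== LEMMAS AND PROOFS =====

-- the per-product score, shared reference form for both proofs
def pvScore (query : String) (product : List (String × String)) : Nat :=
  ((PySem.Str.split₀ (PySem.Str.lower query)).filter
    (fun w => PySem.Str.isIn w (PySem.Str.lower (pvLookup product "title" ++ " " ++ pvLookup product "description")))).length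

theorem kms_eq_pvScore (query : String) (product : List (String × String)) :
    keyword_match_score query (pvLookup product "title" ++ " " ++ pvLookup product "description")
      = (pvScore query product : Int) := by
  simp [keyword_match_score, pvScore, PySem.List.foldl_count_if, List.countP_eq_length_filter]

theorem pvScore_le (query : String) (product : List (String × String)) :
    pvScore query product ≤ (PySem.Str.split₀ (PySem.Str.lower query)).length :=
  List.length_filter_le _ _

-- [n, n-1, …, 1] as Int
def descPos : Nat → List Int
  | 0 => []
  | n + 1 => ((n + 1 : Nat) : Int) :: descPos n

theorem mem_descPos (n : Nat) (s : Int) : s ∈ descPos n ↔ 1 ≤ s ∧ s ≤ n := by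
  induction n with
  | zero => simp [descPos]; omega
  | succ n ih => simp [descPos, ih]; omega

theorem pyRange_eq_descPos (n : Nat) : PySem.List.pyRange (n : Int) 0 (-1) = descPos n := by
  induction n with
  | zero => simp [descPos, PySem.List.pyRange_neg_one_eq_nil (a := 0) (b := 0) le_rfl]
  | succ n ih =>
    rw [PySem.List.pyRange_neg_one_cons (by exact_mod_cast Nat.succ_pos n)]
    have : ((n + 1 : Nat) : Int) - 1 = (n : Int) := by push_cast; ring
    rw [this, ih]; rfl

-- insertBy facts for the descending-stable insertion
theorem insertBy_front {α : Type} (key : α → Int) (x : α) (L : List α)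
    (h : ∀ y ∈ L, key y < key x) :
    PySem.List.insertBy (fun a b => decide (key b < key a)) x L = x :: L := by
  cases L with
  | nil => rfl
  | cons y ys => simp [PySem.List.insertBy, h y (List.mem_cons_self)]

theorem insertBy_append {α : Type} (bef : α → α → Bool) (x : α) (L1 L2 : List α)
    (h : ∀ y ∈ L1, bef x y = false) :
    PySem.List.insertBy bef x (L1 ++ L2) = L1 ++ PySem.List.insertBy bef x L2 := by
  induction L1 with
  | nil => rfl
  | cons y ys ih =>
    simp only [List.cons_append, PySem.List.insertBy, h y (List.mem_cons_self)]
    simp [ih (fun z hz => h z (List.mem_cons_of_mem _ hz))]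

theorem ins_grouped {α : Type} (key : α → Int) (n : Nat) (xs : List α) (x : α)
    (hx0 : 0 ≤ key x) (hxn : key x ≤ n) :
    PySem.List.insertBy (fun a b => decide (key b < key a)) x
      ((descPos n ++ [0]).flatMap (fun s => xs.filter (fun y => decide (key y = s))))
      = (descPos n ++ [0]).flatMap (fun s => (xs ++ [x]).filter (fun y => decide (key y = s))) := by
  induction n with
  | zero =>
    have hx : key x = 0 := le_antisymm (by exact_mod_cast hxn) hx0
    simp only [descPos, List.nil_append, List.flatMap_cons, List.flatMap_nil, List.append_nil]
    rw [PySem.List.insertBy_of_forall_not_before]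
    · simp [List.filter_append, hx]
    · intro y hy
      simp only [List.mem_filter, decide_eq_true_eq] at hy
      simp [hy.2, hx]
  | succ n ih =>
    simp only [descPos, List.cons_append, List.flatMap_cons]
    by_cases hk : key x = ((n + 1 : Nat) : Int)
    · rw [insertBy_append _ _ _ _ (by
        intro y hy
        simp only [List.mem_filter, decide_eq_true_eq] at hy
        simp [hy.2, hk])]
      rw [insertBy_front key x _ (by
        intro y hy
        simp only [List.mem_flatMap, List.mem_filter, decide_eq_true_eq] at hy
        obtain ⟨s, hs, _, hys⟩ := hy
        rw [List.mem_append, mem_descPos] at hs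
        have : s ≤ (n : Int) := by
          rcases hs with h1 | h1
          · exact h1.2
          · simp at h1; omega
        rw [hys, hk]; push_cast; omega)]
      have h1 : (xs ++ [x]).filter (fun y => decide (key y = ((n + 1 : Nat) : Int)))
          = xs.filter (fun y => decide (key y = ((n + 1 : Nat) : Int))) ++ [x] := by
        simp [List.filter_append, hk]
      have h2 : (descPos n ++ [0]).flatMap (fun s => (xs ++ [x]).filter (fun y => decide (key y = s)))
          = (descPos n ++ [0]).flatMap (fun s => xs.filter (fun y => decide (key y = s))) := by
        apply List.flatMap_congr
        intro s hs
        rw [List.mem_append, mem_descPos] at hs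
        have hsn : s ≤ (n : Int) := by
          rcases hs with h1 | h1
          · exact h1.2
          · simp at h1; omega
        have : key x ≠ s := by rw [hk]; push_cast; omega
        simp [List.filter_append, this]
      rw [h1, h2]; simp
    · have hxn' : key x ≤ (n : Int) := by push_cast at hxn ⊢; omega
      rw [insertBy_append _ _ _ _ (by
        intro y hy
        simp only [List.mem_filter, decide_eq_true_eq] at hy
        simp only [decide_eq_false_iff_not, not_lt]
        rw [hy.2]; omega)]
      rw [ih hxn']
      have : (xs ++ [x]).filter (fun y => decide (key y = ((n + 1 : Nat) : Int)))
          = xs.filter (fun y => decide (key y = ((n + 1 : Nat) : Int))) := by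
        have : ¬ key x = ((n + 1 : Nat) : Int) := hk
        simp only [List.filter_append, List.filter_cons, List.filter_nil]
        simp [show ¬ key x = (n : Int) + 1 by push_cast at this ⊢; omega]
      rw [this]

theorem sorted_rev_grouped {α : Type} (key : α → Int) (n : Nat) (xs : List α)
    (h : ∀ x ∈ xs, 0 ≤ key x ∧ key x ≤ n) :
    PySem.List.sorted xs key true
      = (descPos n ++ [0]).flatMap (fun s => xs.filter (fun y => decide (key y = s))) := by
  rw [PySem.List.sorted_rev_eq_foldl_insertBy]
  induction xs using List.reverseRecOn with
  | nil => simp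
  | append_singleton xs x ih =>
    rw [List.foldl_append]
    simp only [List.foldl_cons, List.foldl_nil]
    rw [ih (fun y hy => h y (List.mem_append_left _ hy))]
    exact ins_grouped key n xs x (h x (by simp)).1 (h x (by simp)).2

-- bucket-fold invariant
theorem buckets_spec (sc : List (String × String) → Nat) (n : Nat)
    (hsc : ∀ p, sc p ≤ n) (ps : List (List (String × String)))
    (bks : List (List (List (String × String)))) (hlen : bks.length = n + 1) :
    (ps.foldl (fun bks p => PySem.List.pySetD bks ((sc p : Nat) : Int)
        (PySem.List.pyGetD bks ((sc p : Nat) : Int) [] ++ [p])) bks).length = n + 1 ∧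
    ∀ k : Nat, k ≤ n →
      (ps.foldl (fun bks p => PySem.List.pySetD bks ((sc p : Nat) : Int)
          (PySem.List.pyGetD bks ((sc p : Nat) : Int) [] ++ [p])) bks).getD k []
        = bks.getD k [] ++ ps.filter (fun p => decide (sc p = k)) := by
  induction ps generalizing bks with
  | nil => simpa using hlen
  | cons p ps ih =>
    simp only [List.foldl_cons]
    have hlt : sc p < bks.length := by rw [hlen]; exact Nat.lt_succ_of_le (hsc p)
    have hset : PySem.List.pySetD bks ((sc p : Nat) : Int)
        (PySem.List.pyGetD bks ((sc p : Nat) : Int) [] ++ [p])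
        = bks.set (sc p) (bks.getD (sc p) [] ++ [p]) := by
      simp [PySem.List.pySetD_natCast, PySem.List.pyGetD_natCast]
    rw [hset]
    have hlen' : (bks.set (sc p) (bks.getD (sc p) [] ++ [p])).length = n + 1 := by
      simpa using hlen
    obtain ⟨hL, hK⟩ := ih (bks.set (sc p) (bks.getD (sc p) [] ++ [p])) hlen'
    refine ⟨hL, fun k hk => ?_⟩
    rw [hK k hk]
    have hgd : (bks.set (sc p) (bks.getD (sc p) [] ++ [p])).getD k []
        = if sc p = k then bks.getD k [] ++ [p] else bks.getD k [] := by
      by_cases h : sc p = k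
      · subst h
        simp [List.getD, hlt]
      · simp [List.getD, List.getElem?_set_ne h, h]
    rw [hgd, List.filter_cons]
    by_cases h : sc p = k
    · simp [h]
    · simp [h]

theorem filterMap_eq_self_of_some {α : Type} (l : List α) (f : α → Option α)
    (h : ∀ a ∈ l, f a = some a) : l.filterMap f = l := by
  induction l with
  | nil => rfl
  | cons a t ih => simp [h a (by simp), ih (fun b hb => h b (by simp [hb]))]

theorem retrieve_products_spec_main (query : String) (products : List (List (String × String))) :
    retrieve_products query products = retrieve_products_alt query products := by
  have hA : retrieve_products query products
      = (descPos (PySem.Str.split₀ (PySem.Str.lower query)).length).flatMap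
          (fun s => products.filter (fun p => decide ((pvScore query p : Int) = s))) := by
    unfold retrieve_products
    rw [PySem.List.foldl_append_singleton_eq_map
      (fun product => (keyword_match_score query
        (pvLookup product "title" ++ " " ++ pvLookup product "description"), product))]
    simp only [List.nil_append]
    have hmap : products.map (fun product => (keyword_match_score query
          (pvLookup product "title" ++ " " ++ pvLookup product "description"), product))
        = products.map (fun p => ((pvScore query p : Int), p)) := by
      apply List.map_congr_left; intro p _; rw [kms_eq_pvScore]
    rw [hmap]
    rw [sorted_rev_grouped (fun x : Int × List (String × String) => x.1)
      (PySem.Str.split₀ (PySem.Str.lower query)).length _ (by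
      intro x hx
      simp only [List.mem_map] at hx
      obtain ⟨p, _, rfl⟩ := hx
      constructor
      · positivity
      · show ((pvScore query p : Int)) ≤ _
        exact_mod_cast pvScore_le query p)]
    rw [List.filterMap_flatMap]
    rw [List.flatMap_append]
    have h0 : ([(0 : Int)]).flatMap
        (fun s => ((products.map (fun p => ((pvScore query p : Int), p))).filter
          (fun y => decide (y.1 = s))).filterMap (fun x => if 0 < x.1 then some x.2 else none)) = [] := by
      simp only [List.flatMap_cons, List.flatMap_nil, List.append_nil]
      apply List.filterMap_eq_nil_iff.mpr
      intro a ha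
      simp only [List.mem_filter, decide_eq_true_eq] at ha
      rw [if_neg]; omega
    rw [h0, List.append_nil]
    apply List.flatMap_congr
    intro s hs
    rw [mem_descPos] at hs
    rw [List.filter_map, List.filterMap_map]
    have : products.filter ((fun y : Int × List (String × String) => decide (y.1 = s))
          ∘ (fun p => ((pvScore query p : Int), p)))
        = products.filter (fun p => decide ((pvScore query p : Int) = s)) := rfl
    rw [this]
    apply filterMap_eq_self_of_some
    intro p hp
    simp only [List.mem_filter, decide_eq_true_eq] at hp
    simp only [Function.comp]
    rw [if_pos]; omega
  have hB : retrieve_products_alt query products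
      = (descPos (PySem.Str.split₀ (PySem.Str.lower query)).length).flatMap
          (fun s => products.filter (fun p => decide ((pvScore query p : Int) = s))) := by
    unfold retrieve_products_alt
    dsimp only
    rw [PySem.List.foldl_append_eq_flatMap]
    rw [List.nil_append, pyRange_eq_descPos]
    apply List.flatMap_congr
    intro s hs
    rw [mem_descPos] at hs
    obtain ⟨k, rfl⟩ : ∃ k : Nat, s = (k : Int) := ⟨s.toNat, (Int.toNat_of_nonneg (by omega)).symm⟩
    obtain ⟨_, hfold⟩ := buckets_spec
      (fun product => ((PySem.Str.split₀ (PySem.Str.lower query)).filter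
        (fun w => PySem.Str.isIn w (PySem.Str.lower
          (pvLookup product "title" ++ " " ++ pvLookup product "description")))).length)
      (PySem.Str.split₀ (PySem.Str.lower query)).length (fun p => pvScore_le query p)
      products (List.replicate ((PySem.Str.split₀ (PySem.Str.lower query)).length + 1) []) (by simp)
    rw [PySem.List.pyGetD_natCast]
    have hk2 : k ≤ (PySem.Str.split₀ (PySem.Str.lower query)).length := by omega
    have hgd := hfold k hk2
    rw [List.getD_replicate, List.nil_append] at hgd
    rw [hgd]
    apply List.filter_congr
    intro p _
    simp [pvScore]
    omega
  rw [hA, hB]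

-- ===== VERDICT (by name: the statement is the Claim_ definition above) =====
theorem retrieve_products_spec : Claim_equal_retrieve_products := by
  intro query products _ _
  exact retrieve_products_spec_main query products
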